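-- pv_equiv track=rewrite | github.com/Hircel012Zacarias/DESIGN-AND-ANALYSIS-ALGORITHMS | Train Station Problem.py | max_trains_stop
-- ===== SOURCE A (Python) =====
-- def max_trains_stop(trains, n):
--     # trains: list of tuples (arrival, departure, platform)
--     from collections import defaultdict
--
--     platforms = defaultdict(list)
--
--     # Group trains by platform
--     for arr, dep, plat in trains:
--         platforms[plat].append((arr, dep))
--
--     total = 0
--     for plat in platforms:
--         # Sort by departure time
--         platforms[plat].sort(key=lambda x: x[1])
--
--         count = 0
--         last_dep = -1
--         for arr, dep in platforms[plat]:
--             if arr >= last_dep: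
--                 count += 1
--                 last_dep = dep
--         total += count
--
--     return total
-- ===== SOURCE B (Python) =====
-- def max_trains_stop(trains, n):
--     # trains: list of tuples (arrival, departure, platform)
--     def serve(pool):
--         # consume the pool by repeatedly extracting its earliest-departing train
--         # (first one on ties) and applying the greedy test to it; no sort, no dict
--         count = 0
--         last = -1
--         while pool:
--             best = pool[0]
--             for t in pool[1:]:
--                 if t[1] < best[1]:
--                     best = t
--             pool.remove(best)
--             arr, dep = best
--             if arr >= last:
--                 count += 1
--                 last = dep
--         return count
--
--     seen = []
--     total = 0
--     for _, _, plat in trains: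
--         if plat not in seen:
--             seen.append(plat)
--             total += serve([(a, d) for a, d, q in trains if q == plat])
--     return total
-- ===== Notes on version B (the rewrite author's own statement) =====
-- stated objective: alternative
-- what changed: B never sorts and never builds a dict: for each first-seen platform it filters that platform's trains and consumes the pool by repeatedly extracting the earliest-departing remaining train (selection, pool.remove) and applying the greedy test to it, instead of A's defaultdict grouping plus per-platform sort plus linear scan.
import Mathlib
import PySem

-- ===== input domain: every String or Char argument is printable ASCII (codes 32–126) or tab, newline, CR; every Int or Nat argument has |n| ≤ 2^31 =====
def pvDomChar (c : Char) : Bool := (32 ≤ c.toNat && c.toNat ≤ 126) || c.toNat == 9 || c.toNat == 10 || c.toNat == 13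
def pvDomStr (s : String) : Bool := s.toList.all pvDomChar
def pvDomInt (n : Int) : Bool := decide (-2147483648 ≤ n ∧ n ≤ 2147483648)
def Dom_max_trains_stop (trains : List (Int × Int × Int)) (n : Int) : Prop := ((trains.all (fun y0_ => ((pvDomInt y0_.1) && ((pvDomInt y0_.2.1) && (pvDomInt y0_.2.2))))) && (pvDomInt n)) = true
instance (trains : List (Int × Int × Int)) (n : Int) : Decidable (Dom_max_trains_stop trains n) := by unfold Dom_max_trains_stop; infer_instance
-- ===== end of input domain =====

-- B drops A's defaultdict grouping, per-platform sort and scan: it consumes each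
-- first-seen platform's filtered pool by repeated minimum-departure selection
-- (alternative algorithm, same return value).

-- ===== PORT A =====
def max_trains_stop (trains : List (Int × Int × Int)) (n : Int) : Int :=
  -- platforms = defaultdict(list); for arr, dep, plat in trains: platforms[plat].append((arr, dep))
  let platforms : PySem.Dict Int (List (Int × Int)) :=
    trains.foldl (fun d t => d.modify t.2.2 [] (fun l => l ++ [(t.1, t.2.1)])) PySem.Dict.empty
  -- total = 0; for plat in platforms: sort by departure, then the greedy count loop
  platforms.keys.foldl (fun total plat =>
    let lst := PySem.List.sorted (platforms.getD plat []) (fun x => x.2) false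
    let cl := lst.foldl (fun (s : Int × Int) x => if x.1 ≥ s.2 then (s.1 + 1, x.2) else s)
                ((0 : Int), (-1 : Int))
    total + cl.1) 0

-- ===== PORT B =====
-- best = pool[0]; for t in pool[1:]: if t[1] < best[1]: best = t   (pool[1:] = xs)
def pvBestD : List (Int × Int) → (Int × Int)
  | [] => (0, 0)
  | x :: xs => xs.foldl (fun b t => if t.2 < b.2 then t else b) x

-- pool.remove(best)
def pvRestD (l : List (Int × Int)) : List (Int × Int) :=
  (PySem.List.remove? l (pvBestD l)).getD []

-- (termination helpers for pvServe; cited by its decreasing_by)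
lemma pvBest_mem (xs : List (Int × Int)) : ∀ (x : Int × Int),
    xs.foldl (fun b t => if t.2 < b.2 then t else b) x ∈ x :: xs := by
  induction xs with
  | nil => intro x; exact List.mem_cons_self
  | cons y ys ih =>
    intro x
    simp only [List.foldl_cons]
    rcases List.mem_cons.mp (ih (if y.2 < x.2 then y else x)) with h | h
    · by_cases hy : y.2 < x.2
      · rw [h, if_pos hy]; exact List.mem_cons_of_mem _ List.mem_cons_self
      · rw [h, if_neg hy]; exact List.mem_cons_self
    · exact List.mem_cons_of_mem _ (List.mem_cons_of_mem _ h)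

lemma pvBestD_mem (l : List (Int × Int)) (h : l ≠ []) : pvBestD l ∈ l := by
  cases l with
  | nil => exact absurd rfl h
  | cons x xs => exact pvBest_mem xs x

lemma pvRestD_lt (l : List (Int × Int)) (h : l ≠ []) : (pvRestD l).length < l.length := by
  rw [pvRestD, PySem.List.remove?_eq_some_erase _ _ (pvBestD_mem l h), Option.getD_some,
    List.length_erase_of_mem (pvBestD_mem l h)]
  have hpos : 0 < l.length := List.length_pos_iff.mpr h
  omega

-- while pool: select the first minimum-departure train, remove it, apply the greedy test
def pvServe (pool : List (Int × Int)) (count last : Int) : Int :=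
  match pool with
  | [] => count
  | x :: xs =>
    if (pvBestD (x :: xs)).1 ≥ last then
      pvServe (pvRestD (x :: xs)) (count + 1) (pvBestD (x :: xs)).2
    else pvServe (pvRestD (x :: xs)) count last
termination_by pool.length
decreasing_by all_goals exact pvRestD_lt (x :: xs) (by simp)

def max_trains_stop_alt (trains : List (Int × Int × Int)) (n : Int) : Int :=
  -- seen = []; total = 0; for _, _, plat in trains: if plat not in seen: seen.append(plat);
  --   total += serve([(a, d) for a, d, q in trains if q == plat])
  (trains.foldl (fun (s : List Int × Int) t =>
      if s.1.contains t.2.2 then s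
      else (s.1 ++ [t.2.2],
        s.2 + pvServe ((trains.filter (fun u => u.2.2 == t.2.2)).map (fun u => (u.1, u.2.1))) 0 (-1)))
    ([], 0)).2

-- ===== PRECONDITION & SPEC =====
def Spec_max_trains_stop (trains : List (Int × Int × Int)) (n : Int) (out : Int) : Prop := out = max_trains_stop_alt trains n
instance (trains : List (Int × Int × Int)) (n : Int) (out : Int) : Decidable (Spec_max_trains_stop trains n out) := by unfold Spec_max_trains_stop; infer_instance

-- ===== CLAIM (what is proved, stated in full; the proofs are below) =====
def Claim_equal_max_trains_stop : Prop := ∀ (trains : List (Int × Int × Int)) (n : Int), Dom_max_trains_stop trains n → Spec_max_trains_stop trains n (max_trains_stop trains n)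

-- ===== LEMMAS AND PROOFS =====

-- the departure-only comparison A's per-platform sort uses
def pvLtD (a b : Int × Int × Int) : Bool := decide (a.2.1 < b.2.1)

-- the greedy scan on triples, with explicit (count, last_dep) start state
def pvG (l : List (Int × Int × Int)) (c last : Int) : Int × Int :=
  l.foldl (fun s t => if t.1 ≥ s.2 then (s.1 + 1, t.2.1) else s) (c, last)

-- count offset in the greedy fold is additive
lemma pvG_shift (l : List (Int × Int × Int)) (c last : Int) :
    pvG l c last = (c + (pvG l 0 last).1, (pvG l 0 last).2) := by
  induction l generalizing c last with
  | nil => simp [pvG]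
  | cons t l ih =>
    simp only [pvG, List.foldl_cons]
    by_cases h : t.1 ≥ last
    · simp only [if_pos h]
      show pvG l (c + 1) t.2.1 = (c + (pvG l (0 + 1) t.2.1).1, (pvG l (0 + 1) t.2.1).2)
      rw [ih (c + 1) t.2.1, ih (0 + 1) t.2.1]
      simp only [Prod.mk.injEq]
      constructor
      · omega
      · trivial
    · simp only [if_neg h]
      exact ih c last

-- first-occurrence dedup peels its head
lemma pvFoldlAdd_cons (x : Int) (l : List Int) : ∀ (s : List Int), x ∉ s →
    l.foldl PySem.Set.add (x :: s) = x :: (l.filter (fun y => !(y == x))).foldl PySem.Set.add s := by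
  induction l with
  | nil => intro s _; simp
  | cons y l ih =>
    intro s hx
    by_cases hyx : y = x
    · subst hyx
      have h1 : PySem.Set.add (y :: s) y = y :: s := PySem.Set.add_of_mem List.mem_cons_self
      simp only [List.foldl_cons, List.filter_cons, beq_self_eq_true, Bool.not_true, h1]
      exact ih s hx
    · have hfy : (!(y == x)) = true := by simp [hyx]
      simp only [List.foldl_cons, List.filter_cons, hfy, if_pos]
      by_cases hys : y ∈ s
      · have h1 : PySem.Set.add (x :: s) y = x :: s :=
          PySem.Set.add_of_mem (List.mem_cons_of_mem _ hys)
        have h2 : PySem.Set.add s y = s := PySem.Set.add_of_mem hys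
        rw [h1, h2, ih s hx]
      · have hns : y ∉ x :: s := by
          intro hmem
          rcases List.mem_cons.mp hmem with h | h
          · exact hyx h
          · exact hys h
        have h1 : PySem.Set.add (x :: s) y = (x :: s) ++ [y] :=
          PySem.Set.add_of_not_mem hns
        have h2 : PySem.Set.add s y = s ++ [y] := PySem.Set.add_of_not_mem hys
        have hx2 : x ∉ s ++ [y] := by
          intro hmem
          rcases List.mem_append.mp hmem with h | h
          · exact hx h
          · exact hyx ((List.mem_singleton.mp h).symm)
        rw [h1, h2]
        have : (x :: s) ++ [y] = x :: (s ++ [y]) := rfl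
        rw [this, ih (s ++ [y]) hx2]

lemma pvOfList_cons (x : Int) (l : List Int) :
    PySem.Set.ofList (x :: l) = x :: PySem.Set.ofList (l.filter (fun y => !(y == x))) := by
  have h0 : PySem.Set.ofList (x :: l) = l.foldl PySem.Set.add (x :: []) := by
    rw [PySem.Set.ofList_eq_foldl]
    rfl
  rw [h0, pvFoldlAdd_cons x l [] (List.not_mem_nil), PySem.Set.ofList_eq_foldl]

-- A's dict: keys are the platforms in first-occurrence order
lemma pvDict_keys (trains : List (Int × Int × Int)) :
    (trains.foldl (fun d t => d.modify t.2.2 [] (fun l => l ++ [(t.1, t.2.1)]))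
        (PySem.Dict.empty (κ := Int) (ν := List (Int × Int)))).keys =
      PySem.Set.ofList (trains.map (fun t => t.2.2)) := by
  have aux : ∀ (l : List (Int × Int × Int)) (d : PySem.Dict Int (List (Int × Int))),
      d.keys.Nodup →
      (l.foldl (fun d t => d.modify t.2.2 [] (fun v => v ++ [(t.1, t.2.1)])) d).keys =
        (l.map (fun t => t.2.2)).foldl PySem.Set.add d.keys := by
    intro l
    induction l with
    | nil => intro d _; rfl
    | cons t ts ih =>
      intro d hnd
      simp only [List.foldl_cons, List.map_cons]
      have hmod : (d.modify t.2.2 [] (fun v => v ++ [(t.1, t.2.1)])) =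
          d.insert t.2.2 ((d.getD t.2.2 []) ++ [(t.1, t.2.1)]) := rfl
      rw [hmod]
      have hkeys : (d.insert t.2.2 ((d.getD t.2.2 []) ++ [(t.1, t.2.1)])).keys =
          PySem.Set.add d.keys t.2.2 := by
        rw [PySem.Set.add_eq_ite]
        by_cases hc : t.2.2 ∈ d.keys
        · rw [if_pos hc]
          exact PySem.Dict.keys_insert_of_contains d _ ((PySem.Dict.contains_iff_mem_keys d _).mpr hc)
        · rw [if_neg hc]
          refine PySem.Dict.keys_insert_of_not_contains d _ ?_
          rcases hb : d.contains t.2.2 with _ | _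
          · rfl
          · exact absurd ((PySem.Dict.contains_iff_mem_keys d _).mp hb) hc
      rw [ih _ (PySem.Dict.nodup_keys_insert d _ _ hnd), hkeys]
  rw [aux trains PySem.Dict.empty (by simp [PySem.Dict.keys_empty]),
    PySem.Dict.keys_empty, PySem.Set.ofList_eq_foldl]

-- A's dict: each platform's bucket is the filtered (arr, dep) list in input order
lemma pvDict_getD (trains : List (Int × Int × Int)) (p : Int) :
    (trains.foldl (fun d t => d.modify t.2.2 [] (fun l => l ++ [(t.1, t.2.1)]))
        (PySem.Dict.empty (κ := Int) (ν := List (Int × Int)))).getD p [] =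
      (trains.filter (fun t => t.2.2 == p)).map (fun t => (t.1, t.2.1)) := by
  have aux : ∀ (l : List (Int × Int × Int)) (d : PySem.Dict Int (List (Int × Int))),
      (l.foldl (fun d t => d.modify t.2.2 [] (fun v => v ++ [(t.1, t.2.1)])) d).getD p [] =
        d.getD p [] ++ (l.filter (fun t => t.2.2 == p)).map (fun t => (t.1, t.2.1)) := by
    intro l
    induction l with
    | nil => intro d; simp
    | cons t ts ih =>
      intro d
      simp only [List.foldl_cons, List.filter_cons]
      rw [ih]
      by_cases hp : t.2.2 = p
      · have hb : (t.2.2 == p) = true := by simp [hp]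
        rw [hb]
        have : (d.modify t.2.2 [] (fun v => v ++ [(t.1, t.2.1)])).getD p [] =
            d.getD p [] ++ [(t.1, t.2.1)] := by
          rw [PySem.Dict.getD_modify, if_pos hp.symm, hp]
        rw [this]
        simp
      · have hb : (t.2.2 == p) = false := by simp [hp]
        rw [hb]
        have : (d.modify t.2.2 [] (fun v => v ++ [(t.1, t.2.1)])).getD p [] =
            d.getD p [] := by
          rw [PySem.Dict.getD_modify, if_neg (fun h => hp h.symm)]
        rw [this]
        simp
  rw [aux trains PySem.Dict.empty, PySem.Dict.getD_empty]
  rfl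

-- sorting a mapped list = mapping the sorted list (stable insertion sort commutes with map)
lemma pvInsertBy_map (x : Int × Int × Int) (l : List (Int × Int × Int)) :
    (PySem.List.insertBy pvLtD x l).map (fun t => (t.1, t.2.1)) =
      PySem.List.insertBy (fun a b => decide (a.2 < b.2)) (x.1, x.2.1)
        (l.map (fun t => (t.1, t.2.1))) := by
  induction l with
  | nil => rfl
  | cons y l ih =>
    by_cases h : pvLtD x y = true
    · have h' : decide ((x.1, x.2.1).2 < (y.1, y.2.1).2) = true := h
      simp [pvLtD] at h
      simp [PySem.List.insertBy, pvLtD, h]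
    · have h' : pvLtD x y = false := by simpa using h
      simp only [pvLtD, decide_eq_false_iff_not] at h'
      simp [PySem.List.insertBy, pvLtD, h', ih]

lemma pvSorted_map_pair (l : List (Int × Int × Int)) :
    PySem.List.sorted (l.map (fun t => (t.1, t.2.1))) (fun x => x.2) false =
      (PySem.List.sorted l (fun t => t.2.1) false).map (fun t => (t.1, t.2.1)) := by
  show (l.map (fun t => (t.1, t.2.1))).foldl
      (fun acc x => PySem.List.insertBy (fun a b => decide (a.2 < b.2)) x acc) [] =
    (l.foldl (fun acc x => PySem.List.insertBy pvLtD x acc) []).map (fun t => (t.1, t.2.1))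
  rw [List.foldl_map]
  induction l using List.reverseRecOn with
  | nil => rfl
  | append_singleton l x ih => simp [List.foldl_append, ih, pvInsertBy_map]

-- A equals the canonical per-platform sum
lemma pvA_eq (trains : List (Int × Int × Int)) (n : Int) :
    max_trains_stop trains n =
      ((PySem.Set.ofList (trains.map (fun t => t.2.2))).map
        (fun p => (pvG (PySem.List.sorted (trains.filter (fun t => t.2.2 == p)) (fun t => t.2.1) false) 0 (-1)).1)).sum := by
  simp only [max_trains_stop]
  rw [pvDict_keys, PySem.List.foldl_add, zero_add]
  refine congrArg List.sum (List.map_congr_left ?_)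
  intro p _
  rw [pvDict_getD, pvSorted_map_pair, List.foldl_map]
  rfl

-- ---- B side ----

lemma pvBest_min (xs : List (Int × Int)) : ∀ (x : Int × Int), ∀ z ∈ x :: xs,
    (xs.foldl (fun b t => if t.2 < b.2 then t else b) x).2 ≤ z.2 := by
  induction xs with
  | nil =>
    intro x z hz
    rcases List.mem_cons.mp hz with h | hz
    · rw [h]; exact le_refl _
    · exact absurd hz (List.not_mem_nil)
  | cons y ys ih =>
    intro x z hz
    simp only [List.foldl_cons]
    have hb := ih (if y.2 < x.2 then y else x)
    have hself : (ys.foldl (fun b t => if t.2 < b.2 then t else b) (if y.2 < x.2 then y else x)).2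
        ≤ (if y.2 < x.2 then y else x).2 := hb _ List.mem_cons_self
    have hxy : (ys.foldl (fun b t => if t.2 < b.2 then t else b) (if y.2 < x.2 then y else x)).2
        ≤ x.2 ∧ (ys.foldl (fun b t => if t.2 < b.2 then t else b) (if y.2 < x.2 then y else x)).2
        ≤ y.2 := by
      by_cases hy : y.2 < x.2
      · rw [if_pos hy] at hself ⊢; omega
      · rw [if_neg hy] at hself ⊢; omega
    rcases List.mem_cons.mp hz with h | hz'
    · rw [h]; exact hxy.1
    · rcases List.mem_cons.mp hz' with h | hz''
      · rw [h]; exact hxy.2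
      · exact hb z (List.mem_cons_of_mem _ hz'')

lemma pvBestD_min (l : List (Int × Int)) (h : l ≠ []) : ∀ z ∈ l, (pvBestD l).2 ≤ z.2 := by
  cases l with
  | nil => exact absurd rfl h
  | cons x xs => exact fun z hz => pvBest_min xs x z hz

lemma pvBestD_append (l : List (Int × Int)) (y : Int × Int) (h : l ≠ []) :
    pvBestD (l ++ [y]) = if y.2 < (pvBestD l).2 then y else pvBestD l := by
  cases l with
  | nil => exact absurd rfl h
  | cons x xs => simp [pvBestD, List.foldl_append]

lemma pvSorted_append_singleton (m : List (Int × Int)) (y : Int × Int) :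
    PySem.List.sorted (m ++ [y]) (fun t => t.2) false =
      PySem.List.insertBy (fun a b => decide (a.2 < b.2)) y
        (PySem.List.sorted m (fun t => t.2) false) := by
  rw [PySem.List.sorted_eq_foldl_insertBy, PySem.List.sorted_eq_foldl_insertBy,
    List.foldl_append]
  rfl

lemma pvRemove_append_right (l : List (Int × Int)) (y : Int × Int) (h : y ∉ l) :
    PySem.List.remove? (l ++ [y]) y = some l := by
  induction l with
  | nil => simp
  | cons z l ih =>
    have hzy : z ≠ y := fun he => h (he ▸ List.mem_cons_self)
    have h' : y ∉ l := fun hm => h (List.mem_cons_of_mem _ hm)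
    rw [List.cons_append, PySem.List.remove?_cons_of_ne _ hzy, ih h']
    rfl

-- the head of the stable departure-sort is the first minimum-departure element,
-- and its tail is the sort of the pool with that element removed
lemma pvSortedHead : ∀ (l : List (Int × Int)), l ≠ [] →
    PySem.List.sorted l (fun t => t.2) false =
      pvBestD l :: PySem.List.sorted (pvRestD l) (fun t => t.2) false := by
  intro l
  induction l using List.reverseRecOn with
  | nil => intro h; exact absurd rfl h
  | append_singleton l y ih =>
    intro _
    by_cases hl : l = []
    · subst hl
      have h1 : pvRestD ([] ++ [y]) = [] := by
        simp [pvRestD, pvBestD, PySem.List.remove?_cons_self]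
      have h2 : pvBestD ([] ++ [y]) = y := rfl
      rw [h1, h2, pvSorted_append_singleton]
      rfl
    · by_cases hy : y.2 < (pvBestD l).2
      · have hynotin : y ∉ l := by
          intro hm
          have := pvBestD_min l hl y hm
          omega
        have hrest : pvRestD (l ++ [y]) = l := by
          unfold pvRestD
          rw [pvBestD_append l y hl, if_pos hy, pvRemove_append_right l y hynotin,
            Option.getD_some]
        have hlt : (decide (y.2 < (pvBestD l).2)) = true := by simpa using hy
        rw [pvSorted_append_singleton, ih hl, pvBestD_append l y hl, if_pos hy, hrest, ih hl]
        simp [PySem.List.insertBy, hlt]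
      · have hbm : pvBestD l ∈ l := pvBestD_mem l hl
        have hbm' : pvBestD l ∈ l ++ [y] := List.mem_append_left _ hbm
        have hrest : pvRestD (l ++ [y]) = pvRestD l ++ [y] := by
          unfold pvRestD
          rw [pvBestD_append l y hl, if_neg hy, PySem.List.remove?_eq_some_erase _ _ hbm',
            Option.getD_some, List.erase_append_left _ hbm,
            PySem.List.remove?_eq_some_erase _ _ hbm, Option.getD_some]
        have hge : (decide (y.2 < (pvBestD l).2)) = false := by simpa using hy
        rw [pvSorted_append_singleton, ih hl, pvBestD_append l y hl, if_neg hy, hrest,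
          pvSorted_append_singleton]
        simp [PySem.List.insertBy, hge]

-- the greedy scan on pairs, recursively
def pvSG : List (Int × Int) → Int → Int
  | [], _ => 0
  | x :: xs, last => if x.1 ≥ last then 1 + pvSG xs x.2 else pvSG xs last

-- selection greedy = greedy scan of the stable departure-sort
lemma pvServe_eq_aux : ∀ (N : Nat) (l : List (Int × Int)), l.length ≤ N → ∀ (c last : Int),
    pvServe l c last = c + pvSG (PySem.List.sorted l (fun t => t.2) false) last := by
  intro N
  induction N with
  | zero =>
    intro l hl c last
    have : l = [] := List.length_eq_zero_iff.mp (Nat.le_zero.mp hl)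
    subst this
    simp only [pvServe]
    show c = c + pvSG [] last
    simp [pvSG]
  | succ N ih =>
    intro l hl c last
    cases l with
    | nil =>
      simp only [pvServe]
      show c = c + pvSG [] last
      simp [pvSG]
    | cons x xs =>
      rw [pvSortedHead (x :: xs) (by simp)]
      have hrest : (pvRestD (x :: xs)).length ≤ N := by
        have := pvRestD_lt (x :: xs) (by simp)
        simp only [List.length_cons] at this hl
        omega
      simp only [pvServe]
      by_cases hb : (pvBestD (x :: xs)).1 ≥ last
      · rw [if_pos hb, ih _ hrest, pvSG, if_pos hb]
        omega
      · rw [if_neg hb, ih _ hrest, pvSG, if_neg hb]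

lemma pvServe_eq (l : List (Int × Int)) (c last : Int) :
    pvServe l c last = c + pvSG (PySem.List.sorted l (fun t => t.2) false) last :=
  pvServe_eq_aux l.length l (le_refl _) c last

-- the pair-level recursive greedy equals the triple-level fold greedy
lemma pvSG_eq_pvG (m : List (Int × Int × Int)) : ∀ last,
    pvSG (m.map (fun u => (u.1, u.2.1))) last = (pvG m 0 last).1 := by
  induction m with
  | nil => intro last; rfl
  | cons t m ih =>
    intro last
    simp only [List.map_cons, pvSG, pvG, List.foldl_cons]
    by_cases h : t.1 ≥ last
    · rw [if_pos h, if_pos h]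
      show 1 + pvSG (m.map (fun u => (u.1, u.2.1))) t.2.1 = (pvG m (0 + 1) t.2.1).1
      rw [ih t.2.1, pvG_shift m (0 + 1) t.2.1]
      omega
    · rw [if_neg h, if_neg h]
      exact ih last

-- per platform: B's serve = A's sort-and-scan count
lemma pvPlat (m : List (Int × Int × Int)) :
    pvServe (m.map (fun u => (u.1, u.2.1))) 0 (-1) =
      (pvG (PySem.List.sorted m (fun t => t.2.1) false) 0 (-1)).1 := by
  rw [pvServe_eq, pvSorted_map_pair, pvSG_eq_pvG]
  omega

-- B's seen-list fold accumulates f over the first-occurrence platforms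
lemma pvSeen (f : Int → Int) : ∀ (ts : List (Int × Int × Int)) (seen : List Int) (tot : Int),
    (ts.foldl (fun (s : List Int × Int) t =>
        if s.1.contains t.2.2 then s else (s.1 ++ [t.2.2], s.2 + f t.2.2)) (seen, tot)).2
      = tot + ((PySem.Set.ofList ((ts.map (fun t => t.2.2)).filter
          (fun p => !seen.contains p))).map f).sum := by
  intro ts
  induction ts with
  | nil =>
    intro seen tot
    simp [PySem.Set.ofList]
  | cons t ts ih =>
    intro seen tot
    simp only [List.foldl_cons, List.map_cons, List.filter_cons]
    by_cases hp : t.2.2 ∈ seen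
    · have hc : seen.contains t.2.2 = true := by simpa using hp
      rw [hc]
      simp only [if_pos, Bool.not_true, Bool.false_eq_true, if_neg, not_false_iff]
      exact ih seen tot
    · have hc : seen.contains t.2.2 = false := by simpa using hp
      rw [hc]
      simp only [Bool.not_false, if_pos, Bool.false_eq_true, if_neg, not_false_iff]
      rw [ih (seen ++ [t.2.2]) (tot + f t.2.2), pvOfList_cons]
      have hfil : (ts.map (fun t => t.2.2)).filter (fun q => !(seen ++ [t.2.2]).contains q) =
          ((ts.map (fun t => t.2.2)).filter (fun q => !seen.contains q)).filter
            (fun y => !(y == t.2.2)) := by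
        rw [List.filter_filter]
        refine List.filter_congr ?_
        intro a _
        by_cases h1 : a = t.2.2
        · subst h1; simp
        · by_cases h2 : a ∈ seen <;> simp [h1, h2]
      rw [hfil]
      simp only [List.map_cons, List.sum_cons]
      omega

-- B equals the same canonical per-platform sum
lemma pvB_eq (trains : List (Int × Int × Int)) (n : Int) :
    max_trains_stop_alt trains n =
      ((PySem.Set.ofList (trains.map (fun t => t.2.2))).map
        (fun p => (pvG (PySem.List.sorted (trains.filter (fun t => t.2.2 == p)) (fun t => t.2.1) false) 0 (-1)).1)).sum := by
  refine Eq.trans (pvSeen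
    (fun p => pvServe ((trains.filter (fun u => u.2.2 == p)).map (fun u => (u.1, u.2.1))) 0 (-1))
    trains [] 0) ?_
  have hfil : (trains.map (fun t => t.2.2)).filter (fun p => !(([] : List Int).contains p)) =
      trains.map (fun t => t.2.2) := by simp
  rw [hfil, zero_add]
  exact congrArg List.sum (List.map_congr_left (fun p _ => pvPlat _))

-- ===== VERDICT (by name: the statement is the Claim_ definition above) =====
theorem max_trains_stop_spec : Claim_equal_max_trains_stop := by
  intro trains n _
  unfold Spec_max_trains_stop
  rw [pvA_eq trains n, pvB_eq trains n]
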